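-- pv_equiv track=rewrite | github.com/VishnuLOL/1st-2nd_Year-Tasks | 2.py | ethereum_address
-- ===== SOURCE A (Python) =====
-- def ethereum_address(address): #Function to check for validity of address
--     valid_char = set("0123456789abcdefABCDEF")#Ethereum address will have only these characters
--
--     if len(address)!=42: #Ethereum address should have a length of 42
--         return False
--
--     if not address.startswith("0x"): #All ethereum addresses start with 0x
--         return False
--
--
--     for char in address[2:]:#First two characters will be 0x so checking only for characters after
--         if char not in valid_char:
--             return False
--
--     return True#Returns True only after checking the three conditions for it to be etherum address
-- ===== SOURCE B (Python) =====
-- import re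
--
-- _ETH_RE = re.compile(r"0x[0-9a-fA-F]{40}")
--
-- def ethereum_address(address):
--     return bool(_ETH_RE.fullmatch(address))
-- ===== Notes on version B (the rewrite author's own statement) =====
-- stated objective: idiomatic
-- what changed: Replaced the three sequential guards (length, prefix, per-char set-membership loop) with a single compiled regular-expression fullmatch of the fixed pattern 0x[0-9a-fA-F]{40}.
import Mathlib
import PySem

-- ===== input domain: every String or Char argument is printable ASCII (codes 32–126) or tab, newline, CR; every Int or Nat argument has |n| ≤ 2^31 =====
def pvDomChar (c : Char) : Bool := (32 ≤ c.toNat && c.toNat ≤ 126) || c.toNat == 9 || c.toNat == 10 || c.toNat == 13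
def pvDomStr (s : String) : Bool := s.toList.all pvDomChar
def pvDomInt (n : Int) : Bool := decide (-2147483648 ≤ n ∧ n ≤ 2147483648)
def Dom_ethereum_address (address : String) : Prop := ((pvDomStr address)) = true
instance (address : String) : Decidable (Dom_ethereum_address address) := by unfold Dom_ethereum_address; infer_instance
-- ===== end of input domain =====

-- B replaces A's three sequential guards with one regular-expression fullmatch of the fixed
-- pattern 0x[0-9a-fA-F]{40} (idiomatic; same cost).

-- ===== PORT A =====
-- valid_char = set("0123456789abcdefABCDEF")
def ethValidChar : PySem.Set Char := PySem.Set.ofList "0123456789abcdefABCDEF".toList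

-- the 'for char in address[2:]' loop with its early 'return False'
def ethLoop : List Char → Bool
  | [] => true
  | c :: rest => if !(PySem.Set.contains ethValidChar c) then false else ethLoop rest

def ethereum_address (address : String) : Bool :=
  if PySem.Str.len address ≠ 42 then false
  else if !(PySem.Str.startswith address "0x") then false
  else ethLoop (PySem.Str.slice address (some 2) none).toList

-- ===== PORT B =====
-- Hand port of re.fullmatch(r"0x[0-9a-fA-F]{40}", address): exact for this fixed pattern —
-- the two literal characters '0' 'x', then exactly 40 characters of the class [0-9a-fA-F],
-- then end of input.
def ethIsHex (c : Char) : Bool :=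
  ('0' ≤ c && c ≤ '9') || ('a' ≤ c && c ≤ 'f') || ('A' ≤ c && c ≤ 'F')

-- [0-9a-fA-F]{n} anchored at the end: exactly n class characters, then nothing
def ethMatchHexN : Nat → List Char → Bool
  | 0, [] => true
  | 0, _ :: _ => false
  | _ + 1, [] => false
  | n + 1, c :: rest => ethIsHex c && ethMatchHexN n rest

def ethMatch0x : List Char → Bool
  | '0' :: 'x' :: rest => ethMatchHexN 40 rest
  | _ => false

def ethereum_address_alt (address : String) : Bool :=
  ethMatch0x address.toList

-- ===== PRECONDITION & SPEC =====
def Spec_ethereum_address (address : String) (out : Bool) : Prop := out = ethereum_address_alt address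
instance (address : String) (out : Bool) : Decidable (Spec_ethereum_address address out) := by unfold Spec_ethereum_address; infer_instance

-- ===== CLAIM (what is proved, stated in full; the proofs are below) =====
def Claim_equal_ethereum_address : Prop := ∀ (address : String), Dom_ethereum_address address → Spec_ethereum_address address (ethereum_address address)

-- ===== LEMMAS AND PROOFS =====

-- per-character: membership in A's set equals B's character class
lemma ethValidChar_eq_isHex (c : Char) :
    PySem.Set.contains ethValidChar c = ethIsHex c := by
  have hv : ethValidChar = ['0','1','2','3','4','5','6','7','8','9','a','b','c','d','e','f','A','B','C','D','E','F'] := by decide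
  rw [Bool.eq_iff_iff]
  simp [hv, PySem.Set.contains, ethIsHex, Char.ext_iff, Char.le_def,
    UInt32.ext_iff, UInt32.le_iff_toNat_le]
  omega

-- A's loop is the all-hex check (per-character lemma applied down the list)
lemma ethLoop_eq_all (cs : List Char) : ethLoop cs = cs.all ethIsHex := by
  induction cs with
  | nil => rfl
  | cons c rest ih =>
    simp only [ethLoop, ethValidChar_eq_isHex, ih, List.all_cons]
    cases ethIsHex c <;> simp

-- the bounded matcher = length gate + all-hex check
lemma ethMatchHexN_eq (cs : List Char) (n : Nat) :
    ethMatchHexN n cs = (decide (cs.length = n) && cs.all ethIsHex) := by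
  induction cs generalizing n with
  | nil => cases n <;> simp [ethMatchHexN]
  | cons c rest ih =>
    cases n with
    | zero => simp [ethMatchHexN]
    | succ m =>
      simp only [ethMatchHexN, ih, List.all_cons, List.length_cons]
      cases ethIsHex c <;> cases h : decide (rest.length = m) <;> simp_all

-- list-level form of port A
lemma ethereum_address_eq_list (address : String) :
    ethereum_address address =
      (if address.toList.length ≠ 42 then false
       else if !(PySem.Chars.startswith address.toList ['0', 'x']) then false
       else ethLoop (address.toList.drop 2)) := by
  have hsl : (PySem.Str.slice address (some 2) none).toList = address.toList.drop 2 := by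
    simp [PySem.Str.slice, PySem.List.slice_from]
  rw [ethereum_address, hsl]
  simp [PySem.Str.startswith_eq]
  norm_cast

-- B's matcher evaluated on the two pattern shapes
lemma ethMatch0x_cons (rest : List Char) :
    ethMatch0x ('0' :: 'x' :: rest) = ethMatchHexN 40 rest := rfl

lemma ethMatch0x_false (l : List Char) (h : ∀ rest : List Char, l ≠ '0' :: 'x' :: rest) :
    ethMatch0x l = false := by
  rw [ethMatch0x.eq_def]
  split
  · next rest => exact absurd rfl (h rest)
  · rfl

-- ===== VERDICT (by name: the statement is the Claim_ definition above) =====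
theorem ethereum_address_spec : Claim_equal_ethereum_address := by
  intro address _
  unfold Spec_ethereum_address ethereum_address_alt
  rw [ethereum_address_eq_list]
  generalize address.toList = l
  by_cases hsw : PySem.Chars.startswith l ['0', 'x'] = true
  · obtain ⟨rest, hrest⟩ := (PySem.Chars.startswith_iff l ['0', 'x']).mp hsw
    subst hrest
    simp only [List.cons_append, List.nil_append] at hsw ⊢
    rw [hsw, ethMatch0x_cons, ethMatchHexN_eq, ethLoop_eq_all]
    simp only [List.length_cons, List.drop_succ_cons, List.drop_zero, Bool.not_true,
      Bool.false_eq_true, if_false]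
    by_cases h : rest.length = 40
    · simp [h]
    · have hne : rest.length + 1 + 1 ≠ 42 := by omega
      simp [h, hne]
  · have hm : ethMatch0x l = false := by
      apply ethMatch0x_false
      intro rest hrest
      exact hsw ((PySem.Chars.startswith_iff l ['0', 'x']).mpr ⟨rest, hrest.symm⟩)
    rw [hm, Bool.eq_false_iff] at *
    by_cases hlen : l.length ≠ 42 <;> simp [hlen, Bool.eq_false_iff.mpr hsw]
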